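-- pv_equiv track=rewrite | github.com/LUC-AI4FM/ChatTLA | scripts/coarse_audit_demo.py | tokenize_row
-- ===== SOURCE A (Python) =====
-- def tokenize_row(r: dict) -> set[str]:
--     """Bag of tokens for retrieval (Step 2)."""
--     fields = ["Expressions", "StateAndActions", "StandardLibrary",
--               "TemporalLogic", "Definitions"]
--     toks: set[str] = set()
--     for f in fields:
--         text = r.get(f, "") or ""
--         for chunk in text.split(";"):
--             for tok in chunk.replace(",", " ").split():
--                 tok = tok.strip()
--                 if tok and len(tok) > 1:
--                     toks.add(tok)
--     return toks
-- ===== SOURCE B (Python) =====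
-- def tokenize_row(r: dict) -> set[str]:
--     """Bag of tokens for retrieval (Step 2)."""
--     fields = ["Expressions", "StateAndActions", "StandardLibrary",
--               "TemporalLogic", "Definitions"]
--     combined = " ".join((r.get(f, "") or "") for f in fields)
--     toks: set[str] = set()
--     cur: list[str] = []
--     for ch in combined:
--         if ch == ";" or ch == "," or ch.isspace():
--             if len(cur) > 1:
--                 toks.add("".join(cur))
--             cur = []
--         else:
--             cur.append(ch)
--     if len(cur) > 1:
--         toks.add("".join(cur))
--     return toks
-- ===== Notes on version B (the rewrite author's own statement) =====
-- stated objective: simpler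
-- what changed: A's three nested loops (per field, per ';'-chunk, per whitespace token of the comma-replaced chunk, with strip and filter) are replaced by one character-level scan over the five field values joined with spaces, which accumulates the current run of non-delimiter characters and flushes it into the set at each ';', ',' or whitespace character.
import Mathlib
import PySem

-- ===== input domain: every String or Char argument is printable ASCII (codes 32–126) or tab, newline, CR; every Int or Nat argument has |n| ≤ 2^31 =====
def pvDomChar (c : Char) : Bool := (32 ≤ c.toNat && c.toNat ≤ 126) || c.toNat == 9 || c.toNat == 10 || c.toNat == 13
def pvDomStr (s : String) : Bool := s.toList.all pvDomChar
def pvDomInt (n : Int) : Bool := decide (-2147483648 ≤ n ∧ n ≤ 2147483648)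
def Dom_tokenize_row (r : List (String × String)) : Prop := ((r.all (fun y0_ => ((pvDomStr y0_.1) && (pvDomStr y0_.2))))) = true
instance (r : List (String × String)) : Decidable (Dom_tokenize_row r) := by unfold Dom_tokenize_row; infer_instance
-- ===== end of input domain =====

-- B replaces A's three nested split loops by one character-level scan over the space-joined
-- fields (objective: simpler — one pass, one loop); return values proved equal on all inputs.

-- ===== PORT A =====
def tokenize_row (r : List (String × String)) : List String :=
  let fields := ["Expressions", "StateAndActions", "StandardLibrary", "TemporalLogic", "Definitions"]
  fields.foldl (fun toks f =>
    let t := PySem.Dict.getD (PySem.Dict.mk r) f ""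
    let text := if t = "" then "" else t        -- `r.get(f, "") or ""`
    ((PySem.Str.split? text ";").getD []).foldl (fun toks chunk =>
      (PySem.Str.split₀ (PySem.Str.replace chunk "," " ")).foldl (fun toks tok =>
        let tok := PySem.Str.strip tok
        if tok ≠ "" ∧ PySem.Str.len tok > 1 then PySem.Set.add toks tok else toks)
        toks)
      toks)
    PySem.Set.empty

-- ===== PORT B =====
def tokenize_row_alt (r : List (String × String)) : List String :=
  let fields := ["Expressions", "StateAndActions", "StandardLibrary", "TemporalLogic", "Definitions"]
  let combined := PySem.Str.join " "
    (fields.map (fun f => let t := PySem.Dict.getD (PySem.Dict.mk r) f ""; if t = "" then "" else t))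
  let st := combined.toList.foldl (fun (st : PySem.Set String × List Char) ch =>
      if ch = ';' ∨ ch = ',' ∨ PySem.Chars.isspace ch then
        (if st.2.length > 1 then PySem.Set.add st.1 (String.ofList st.2) else st.1, [])
      else (st.1, st.2 ++ [ch]))
    (PySem.Set.empty, [])
  if st.2.length > 1 then PySem.Set.add st.1 (String.ofList st.2) else st.1

-- ===== PRECONDITION & SPEC =====
def Spec_tokenize_row (r : List (String × String)) (out : List String) : Prop := out = tokenize_row_alt r
instance (r : List (String × String)) (out : List String) : Decidable (Spec_tokenize_row r out) := by unfold Spec_tokenize_row; infer_instance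

-- ===== CLAIM (what is proved, stated in full; the proofs are below) =====
def Claim_equal_tokenize_row : Prop := ∀ (r : List (String × String)), Dom_tokenize_row r → Spec_tokenize_row r (tokenize_row r)

-- ===== LEMMAS AND PROOFS =====

-- delimiter predicates: whitespace; whitespace-or-comma; all three delimiter kinds
def pvW2 (c : Char) : Bool := PySem.Chars.isspace c || c == ','
def pvD (c : Char) : Bool := c == ';' || c == ',' || PySem.Chars.isspace c
def pvF (c : Char) : Char := if c = ',' then ' ' else c

-- canonical tokenizer: maximal runs of non-p characters (cur = current run, reversed)
def pvTok (p : Char → Bool) : List Char → List Char → List (List Char)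
  | [], cur => if cur.isEmpty then [] else [cur.reverse]
  | c :: rest, cur =>
      if p c then (if cur.isEmpty then pvTok p rest [] else cur.reverse :: pvTok p rest [])
      else pvTok p rest (c :: cur)

-- fuel-free model of str.split(";")
def pvSp : List Char → List Char → List (List Char)
  | [], cur => [cur.reverse]
  | c :: rest, cur => if c == ';' then cur.reverse :: pvSp rest [] else pvSp rest (c :: cur)

def pvStep (toks : PySem.Set String) (tkn : List Char) : PySem.Set String :=
  if tkn.length > 1 then PySem.Set.add toks (String.ofList tkn) else toks

-- B's scan step and final flush (syntactically the body of tokenize_row_alt's fold)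
def pvBStep (st : PySem.Set String × List Char) (ch : Char) : PySem.Set String × List Char :=
  if ch = ';' ∨ ch = ',' ∨ PySem.Chars.isspace ch then
    (if st.2.length > 1 then PySem.Set.add st.1 (String.ofList st.2) else st.1, [])
  else (st.1, st.2 ++ [ch])

def pvFin (st : PySem.Set String × List Char) : PySem.Set String :=
  if st.2.length > 1 then PySem.Set.add st.1 (String.ofList st.2) else st.1

theorem pvD_iff (c : Char) : (c = ';' ∨ c = ',' ∨ PySem.Chars.isspace c = true) ↔ pvD c = true := by
  simp [pvD, or_assoc]

theorem pvW2_false_of_D {c : Char} (h : pvD c = false) : pvW2 c = false := by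
  simp [pvD] at h
  obtain ⟨⟨h1, h2⟩, h3⟩ := h
  simp [pvW2, h2, h3]

theorem pvSp_ne (l cur : List Char) : pvSp l cur ≠ [] := by

  induction l generalizing cur with
  | nil => simp [pvSp]
  | cons c t ih => by_cases h : (c == ';') = true <;> simp [pvSp, h] <;> exact ih _


theorem pvSp_cur (l cur : List Char) :
    pvSp l cur = (cur.reverse ++ (pvSp l []).headI) :: (pvSp l []).tail := by

  induction l generalizing cur with
  | nil => simp [pvSp]
  | cons c t ih =>
      by_cases h : (c == ';') = true
      · simp [pvSp, h]
      · simp only [pvSp, h, if_neg, Bool.not_eq_true]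
        rw [ih (c :: cur), ih [c]]
        simp


theorem pvTok_cur (p : Char → Bool) (l : List Char) :
    ∀ cur, cur ≠ [] →
      pvTok p l cur
        = (cur.reverse ++ (l.takeWhile fun c => !p c)) :: pvTok p (l.dropWhile fun c => !p c) [] := by

  induction l with
  | nil => intro cur hc; simp [pvTok, List.isEmpty_iff, hc]
  | cons c t ih =>
      intro cur hc
      by_cases h : p c = true
      · simp [pvTok, h, List.isEmpty_iff, hc, List.takeWhile_cons, List.dropWhile_cons]
      · simp only [Bool.not_eq_true] at h
        simp only [pvTok, h, Bool.false_eq_true, if_false, List.takeWhile_cons,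
          List.dropWhile_cons, h, Bool.not_false, if_true]
        rw [ih (c :: cur) (by simp)]
        simp


theorem pvDropAll {q : Char → Bool} {m : List Char} (h : ∀ x ∈ m, q x = false) :
    m.dropWhile q = m := by

  cases m with
  | nil => rfl
  | cons a t => simp [List.dropWhile_cons, h a (by simp)]


theorem pvTok_nodelim {p : Char → Bool} {m : List Char} (h : ∀ x ∈ m, p x = false) :
    pvTok p m [] = if m.isEmpty then [] else [m] := by

  cases m with
  | nil => rfl
  | cons c t =>
      have hc : p c = false := h c (by simp)
      simp only [pvTok, hc, Bool.false_eq_true, if_false]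
      rw [pvTok_cur p t [c] (by simp)]
      have ht : ∀ x ∈ t, (fun c => !p c) x = true := fun x hx => by
        simp [h x (by simp [hx])]
      rw [List.takeWhile_eq_self_iff.mpr ht, List.dropWhile_eq_nil_iff.mpr ht]
      simp [pvTok]


theorem pvTok_prefix_delim {p : Char → Bool} {m : List Char} {c : Char} (rest : List Char)
    (hm : ∀ x ∈ m, p x = false) (hc : p c = true) :
    pvTok p (m ++ c :: rest) [] = (if m.isEmpty then [] else [m]) ++ pvTok p rest [] := by

  cases m with
  | nil => simp [pvTok, hc]
  | cons a m' =>
      have ha : p a = false := hm a (by simp)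
      have hm' : ∀ x ∈ m', (fun c => !p c) x = true := fun x hx => by
        simp [hm x (by simp [hx])]
      simp only [List.cons_append, pvTok, ha, Bool.false_eq_true, if_false]
      rw [pvTok_cur p (m' ++ c :: rest) [a] (by simp)]
      have htw : (m' ++ c :: rest).takeWhile (fun c => !p c) = m' := by
        rw [List.takeWhile_append, List.takeWhile_eq_self_iff.mpr hm']
        simp [hc]
      have hdw : (m' ++ c :: rest).dropWhile (fun c => !p c) = c :: rest := by
        rw [List.dropWhile_append, List.dropWhile_eq_nil_iff.mpr hm']
        simp [hc]
      rw [htw, hdw]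
      simp only [pvTok, hc, if_true, List.isEmpty_cons, Bool.false_eq_true, if_false]
      simp


theorem pvTok_mem (p : Char → Bool) (l : List Char) :
    ∀ cur t, (∀ x ∈ cur, p x = false) → t ∈ pvTok p l cur → t ≠ [] ∧ ∀ x ∈ t, p x = false := by

  induction l with
  | nil =>
      intro cur t hcur ht
      by_cases h : cur = [] <;> simp [pvTok, List.isEmpty_iff, h] at ht
      subst ht
      constructor
      · simp [h]
      · intro x hx; exact hcur x (by simpa using hx)
  | cons c rest ih =>
      intro cur t hcur ht
      by_cases h : p c = true
      · by_cases hc : cur = []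
        · subst hc; simp [pvTok, h] at ht
          exact ih [] t (by simp) ht
        · simp [pvTok, h, List.isEmpty_iff, hc] at ht
          rcases ht with rfl | ht
          · exact ⟨by simp [hc], fun x hx => hcur x (by simpa using hx)⟩
          · exact ih [] t (by simp) ht
      · simp only [Bool.not_eq_true] at h
        simp only [pvTok, h, Bool.false_eq_true, if_false] at ht
        refine ih (c :: cur) t ?_ ht
        intro x hx
        rcases List.mem_cons.mp hx with rfl | hx
        · exact h
        · exact hcur x hx


theorem pvTok_append_delim {p : Char → Bool} {c : Char} (hc : p c = true) (rest : List Char)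
    (m : List Char) : ∀ cur, pvTok p (m ++ c :: rest) cur = pvTok p m cur ++ pvTok p rest [] := by

  induction m with
  | nil =>
      intro cur
      by_cases h : cur = [] <;> simp [pvTok, hc, List.isEmpty_iff, h]
  | cons a m' ih =>
      intro cur
      by_cases h : p a = true <;>
        by_cases h2 : cur = [] <;>
          simp [pvTok, h, h2, List.isEmpty_iff, ih]


theorem pvTok_map (l : List Char) :
    ∀ cur, pvTok PySem.Chars.isspace (l.map pvF) cur = pvTok pvW2 l cur := by

  have key : ∀ c, PySem.Chars.isspace (pvF c) = pvW2 c := by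
    intro c
    by_cases h : c = ','
    · subst h; simp [pvF, pvW2]; decide
    · simp [pvF, pvW2, h]
  induction l with
  | nil => intro cur; rfl
  | cons c t ih =>
      intro cur
      by_cases h : pvW2 c = true
      · simp [pvTok, key, h, ih]
      · have hc : c ≠ ',' := by
          intro hx; subst hx; simp [pvW2] at h
        have hs : PySem.Chars.isspace c = false := by
          simp [pvW2] at h; exact h.1
        simp [pvTok, key, h, pvF, hc, hs, ih]


theorem pvGo_split₀ (l : List Char) :
    ∀ cur acc, PySem.Chars.split₀.go l cur acc = acc.reverse ++ pvTok PySem.Chars.isspace l cur := by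

  induction l with
  | nil => intro cur acc; simp [PySem.Chars.split₀.go, pvTok, List.isEmpty_iff]; split <;> simp
  | cons c t ih =>
      intro cur acc
      by_cases h : PySem.Chars.isspace c = true
      · by_cases hc : cur = [] <;>
          simp [PySem.Chars.split₀.go, pvTok, h, List.isEmpty_iff, hc, ih]
      · simp only [Bool.not_eq_true] at h
        simp [PySem.Chars.split₀.go, pvTok, h, ih]


theorem pvGo_splitOn (fuel : Nat) :
    ∀ l cur acc, l.length ≤ fuel →
      PySem.Chars.splitOn.go [';'] fuel l cur acc = acc.reverse ++ pvSp l cur := by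

  induction fuel with
  | zero =>
      intro l cur acc hl
      have : l = [] := by cases l <;> simp_all
      subst this
      simp [PySem.Chars.splitOn.go, pvSp]
  | succ f ih =>
      intro l cur acc hl
      cases l with
      | nil => simp [PySem.Chars.splitOn.go, pvSp]
      | cons c t =>
          by_cases h : (c == ';') = true
          · have hc : c = ';' := by simpa using h
            subst hc
            simp only [PySem.Chars.splitOn.go, pvSp, h]
            rw [if_pos (by rw [List.isPrefixOf_iff_prefix]; simp [List.cons_prefix_cons])]
            have hd : List.drop [';'].length (';' :: t) = t := rfl
            rw [hd, ih t [] (cur.reverse :: acc) (by simpa using Nat.le_of_succ_le_succ hl)]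
            simp
          · simp only [PySem.Chars.splitOn.go, pvSp, h]
            rw [if_neg ?_]
            · exact ih t (c :: cur) acc (by simpa using Nat.le_of_succ_le_succ hl)
            · rw [List.isPrefixOf_iff_prefix]
              simp [List.cons_prefix_cons]
              intro hc; exact absurd (by simp [hc.symm]) h


theorem pvSplitOn (cs : List Char) : PySem.Chars.splitOn cs [';'] = pvSp cs [] := by

  unfold PySem.Chars.splitOn
  rw [pvGo_splitOn (cs.length + 1) cs [] [] (by omega)]
  simp


theorem pvGo_replace (fuel : Nat) :
    ∀ l acc, l.length ≤ fuel →
      PySem.Chars.replace.go [','] [' '] fuel l acc = acc.reverse ++ l.map pvF := by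

  induction fuel with
  | zero =>
      intro l acc hl
      have : l = [] := by cases l <;> simp_all
      subst this
      simp [PySem.Chars.replace.go]
  | succ f ih =>
      intro l acc hl
      cases l with
      | nil => simp [PySem.Chars.replace.go]
      | cons c t =>
          by_cases h : c = ','
          · subst h
            simp only [PySem.Chars.replace.go]
            rw [if_pos (by rw [List.isPrefixOf_iff_prefix]; simp [List.cons_prefix_cons])]
            have hd : List.drop [','].length (',' :: t) = t := rfl
            rw [hd, ih t ([' '].reverse ++ acc) (by simpa using Nat.le_of_succ_le_succ hl)]
            simp [pvF]
          · simp only [PySem.Chars.replace.go]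
            rw [if_neg ?_]
            · rw [ih t (c :: acc) (by simpa using Nat.le_of_succ_le_succ hl)]
              simp [pvF, h]
            · rw [List.isPrefixOf_iff_prefix]
              simp [List.cons_prefix_cons]
              intro hc; exact absurd hc.symm h


theorem pvReplace_comma (cs : List Char) : PySem.Chars.replace cs [','] [' '] = cs.map pvF := by

  unfold PySem.Chars.replace
  rw [if_neg (by simp)]
  exact pvGo_replace cs.length cs [] (le_refl _)


theorem pvStrip_id {m : List Char} (h : ∀ x ∈ m, PySem.Chars.isspace x = false) :
    PySem.Chars.strip m = m := by

  unfold PySem.Chars.strip PySem.Chars.lstrip PySem.Chars.rstrip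
  rw [pvDropAll h]
  rw [pvDropAll (fun x hx => h x (by simpa using hx))]
  simp


theorem pvFoldl_flatMap {α β γ : Type} (l : List α) (g : α → List β) (f : γ → β → γ) (init : γ) :
    (l.flatMap g).foldl f init = l.foldl (fun acc x => (g x).foldl f acc) init := by

  induction l generalizing init with
  | nil => rfl
  | cons a t ih => simp [List.flatMap_cons, List.foldl_append, ih]


theorem pvFoldl_map_congr {α β γ : Type} (l : List α) (h : α → β) (f : γ → β → γ) (g : γ → α → γ)
    (he : ∀ x ∈ l, ∀ acc, f acc (h x) = g acc x) :
    ∀ init, (l.map h).foldl f init = l.foldl g init := by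

  induction l with
  | nil => intro init; rfl
  | cons a t ih =>
      intro init
      simp only [List.map_cons, List.foldl_cons, he a (by simp)]
      exact ih (fun x hx acc => he x (by simp [hx]) acc) _


-- A's innermost loop (strip + filter + add) over the split₀ tokens of a chunk = pvStep-fold
theorem pvInner (m : List Char) (toks : PySem.Set String) :
    ((pvTok pvW2 m []).map String.ofList).foldl
      (fun toks tok =>
        let tok := PySem.Str.strip tok
        if tok ≠ "" ∧ PySem.Str.len tok > 1 then PySem.Set.add toks tok else toks) toks
    = (pvTok pvW2 m []).foldl pvStep toks := by

  refine pvFoldl_map_congr _ _ _ _ ?_ toks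
  intro tkn ht acc
  obtain ⟨hne, hall⟩ := pvTok_mem pvW2 m [] tkn (by simp) ht
  have hsp : ∀ x ∈ tkn, PySem.Chars.isspace x = false := by
    intro x hx
    have := hall x hx
    simp [pvW2] at this
    exact this.1
  have hstr : PySem.Str.strip (String.ofList tkn) = String.ofList tkn := by
    rw [← String.toList_inj, PySem.Str.toList_strip]
    simp [pvStrip_id hsp]
  have hne' : String.ofList tkn ≠ "" := by
    intro hx
    apply hne
    have := congrArg String.toList hx
    simpa using this
  have hlen : PySem.Str.len (String.ofList tkn) = (tkn.length : Int) := by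
    simp [PySem.Str.len]
  simp only [hstr, pvStep]
  by_cases hl : tkn.length > 1
  · rw [if_pos ⟨hne', by rw [hlen]; exact_mod_cast hl⟩, if_pos hl]
  · rw [if_neg ?_, if_neg hl]
    rintro ⟨-, h2⟩
    rw [hlen] at h2
    exact hl (by exact_mod_cast h2)


-- split on ';' then tokenize each chunk on whitespace/comma = tokenize once on all delimiters
theorem pvE (l : List Char) :
    ∀ cur, (∀ x ∈ cur, pvD x = false) →
      (pvSp l cur).flatMap (fun ch => pvTok pvW2 ch []) = pvTok pvD l cur := by

  induction l with
  | nil =>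
      intro cur hcur
      have hw2 : ∀ x ∈ cur.reverse, pvW2 x = false := fun x hx =>
        pvW2_false_of_D (hcur x (by simpa using hx))
      simp only [pvSp, List.flatMap_cons, List.flatMap_nil, List.append_nil]
      rw [pvTok_nodelim hw2]
      simp [pvTok]
  | cons c t ih =>
      intro cur hcur
      have hw2 : ∀ x ∈ cur.reverse, pvW2 x = false := fun x hx =>
        pvW2_false_of_D (hcur x (by simpa using hx))
      by_cases hsemi : c = ';'
      · subst hsemi
        simp only [pvSp, beq_self_eq_true, if_true, List.flatMap_cons]
        rw [pvTok_nodelim hw2, ih [] (by simp)]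
        have hdc : pvD ';' = true := by decide
        by_cases hc : cur = [] <;> simp [pvTok, hdc, List.isEmpty_iff, hc]
      · have hsemi' : (c == ';') = false := by simp [hsemi]
        by_cases hd : pvD c = true
        · have hw2c : pvW2 c = true := by
            simp [pvD, hsemi] at hd
            rcases hd with h | h <;> simp [pvW2, h]
          obtain ⟨h1, tl, hsp⟩ : ∃ h1 tl, pvSp t [] = h1 :: tl := by
            cases hsp' : pvSp t [] with
            | nil => exact absurd hsp' (pvSp_ne t [])
            | cons a b => exact ⟨a, b, rfl⟩
          have hstep : pvSp (c :: t) cur = (cur.reverse ++ c :: h1) :: tl := by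
            simp only [pvSp, hsemi', Bool.false_eq_true, if_false]
            rw [pvSp_cur t (c :: cur), hsp]
            simp
          rw [hstep]
          simp only [List.flatMap_cons]
          rw [pvTok_prefix_delim h1 ?hm hw2c]
          case hm =>
            intro x hx
            exact pvW2_false_of_D (hcur x (by simpa using hx))
          have hih : pvTok pvW2 h1 [] ++ tl.flatMap (fun ch => pvTok pvW2 ch []) = pvTok pvD t [] := by
            have := ih [] (by simp)
            rw [hsp] at this
            simpa using this
          by_cases hc : cur = []
          · simp only [pvTok, hd, if_true, hc, List.isEmpty_nil, List.reverse_nil, List.nil_append]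
            rw [← hih]
          · simp only [pvTok, hd, if_true, List.isEmpty_iff, hc]
            rw [← hih]
            simp [List.isEmpty_iff, hc]
        · have hd' : pvD c = false := by simpa using hd
          simp only [pvSp, hsemi', Bool.false_eq_true, if_false]
          rw [ih (c :: cur) ?_]
          · simp [pvTok, hd']
          · intro x hx
            rcases List.mem_cons.mp hx with rfl | hx
            · exact hd'
            · exact hcur x hx


-- B's scan = pvStep-fold over the pvD tokens
theorem pvScan (l : List Char) :
    ∀ (toks : PySem.Set String) cur,
      pvFin (l.foldl pvBStep (toks, cur)) = (pvTok pvD l cur.reverse).foldl pvStep toks := by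
  induction l with
  | nil =>
      intro toks cur
      by_cases hc : cur = [] <;>
        simp [pvFin, pvTok, pvStep, List.isEmpty_iff, hc]
  | cons c t ih =>
      intro toks cur
      by_cases hd : pvD c = true
      · have hcond : (c = ';' ∨ c = ',' ∨ PySem.Chars.isspace c = true) := (pvD_iff c).mpr hd
        simp only [List.foldl_cons, pvBStep, if_pos hcond]
        rw [ih _ []]
        by_cases hc : cur = [] <;>
          simp [pvTok, pvStep, hd, List.isEmpty_iff, hc]
      · have hcond : ¬ (c = ';' ∨ c = ',' ∨ PySem.Chars.isspace c = true) := fun h =>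
          absurd ((pvD_iff c).mp h) hd
        have hd' : pvD c = false := by simpa using hd
        simp only [List.foldl_cons, pvBStep, if_neg hcond]
        rw [ih toks (cur ++ [c])]
        simp [pvTok, hd']

theorem pvJoin (ls : List (List Char)) :
    pvTok pvD (PySem.Chars.join [' '] ls) [] = ls.flatMap (fun tx => pvTok pvD tx []) := by

  induction ls with
  | nil => simp [PySem.Chars.join_nil, pvTok]
  | cons t ts ih =>
      cases ts with
      | nil => simp [PySem.Chars.join_singleton]
      | cons t2 ts2 =>
          have hj : PySem.Chars.join [' '] (t :: t2 :: ts2)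
              = t ++ ' ' :: PySem.Chars.join [' '] (t2 :: ts2) := by
            rw [PySem.Chars.join_cons_cons]
            simp
          rw [hj, pvTok_append_delim (by decide : pvD ' ' = true) _ t [], ih]
          simp


-- per-field pipeline of A = pvStep-fold over the pvD tokens of the field text
theorem pvField (text : String) (toks : PySem.Set String) :
    ((PySem.Str.split? text ";").getD []).foldl (fun toks chunk =>
      (PySem.Str.split₀ (PySem.Str.replace chunk "," " ")).foldl (fun toks tok =>
        let tok := PySem.Str.strip tok
        if tok ≠ "" ∧ PySem.Str.len tok > 1 then PySem.Set.add toks tok else toks) toks) toks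
    = (pvTok pvD text.toList []).foldl pvStep toks := by

  have hsplit : (PySem.Str.split? text ";").getD []
      = (pvSp text.toList []).map String.ofList := by
    simp [PySem.Str.split?, PySem.Chars.split?, pvSplitOn]
  rw [hsplit]
  rw [pvFoldl_map_congr _ _ _
    (fun toks m => (pvTok pvW2 m []).foldl pvStep toks) ?_ toks]
  · rw [← pvFoldl_flatMap, pvE text.toList [] (by simp)]
  · intro m _ acc
    have hrep : (PySem.Str.replace (String.ofList m) "," " ").toList = m.map pvF := by
      rw [PySem.Str.toList_replace]
      simpa using pvReplace_comma m
    have hsp0 : PySem.Str.split₀ (PySem.Str.replace (String.ofList m) "," " ")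
        = (pvTok pvW2 m []).map String.ofList := by
      simp only [PySem.Str.split₀, PySem.Chars.split₀, hrep]
      rw [pvGo_split₀, pvTok_map]
      simp
    rw [hsp0]
    exact pvInner m acc


theorem pvMain (texts : List String) :
    texts.foldl (fun toks text =>
      ((PySem.Str.split? text ";").getD []).foldl (fun toks chunk =>
        (PySem.Str.split₀ (PySem.Str.replace chunk "," " ")).foldl (fun toks tok =>
          let tok := PySem.Str.strip tok
          if tok ≠ "" ∧ PySem.Str.len tok > 1 then PySem.Set.add toks tok else toks) toks) toks)
      PySem.Set.empty
    = pvFin ((PySem.Str.join " " texts).toList.foldl pvBStep (PySem.Set.empty, [])) := by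
  rw [pvScan _ _ []]
  have hcomb : (PySem.Str.join " " texts).toList
      = PySem.Chars.join [' '] (texts.map String.toList) := by
    rw [PySem.Str.toList_join]
    rfl
  rw [hcomb, List.reverse_nil, pvJoin]
  have hmm : (texts.map String.toList).flatMap (fun tx => pvTok pvD tx [])
      = texts.flatMap (fun tx => pvTok pvD tx.toList []) := by
    rw [List.flatMap_map]
  rw [hmm, pvFoldl_flatMap]
  have hfun : (fun (toks : PySem.Set String) (text : String) =>
      ((PySem.Str.split? text ";").getD []).foldl (fun toks chunk =>
        (PySem.Str.split₀ (PySem.Str.replace chunk "," " ")).foldl (fun toks tok =>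
          let tok := PySem.Str.strip tok
          if tok ≠ "" ∧ PySem.Str.len tok > 1 then PySem.Set.add toks tok else toks) toks) toks)
      = fun (toks : PySem.Set String) (text : String) =>
          (pvTok pvD text.toList []).foldl pvStep toks := by
    funext toks text
    exact pvField text toks
  rw [hfun]

-- ===== VERDICT (by name: the statement is the Claim_ definition above) =====
theorem tokenize_row_spec : Claim_equal_tokenize_row := by
  intro r _
  show tokenize_row r = tokenize_row_alt r
  unfold tokenize_row tokenize_row_alt
  exact pvMain
    (["Expressions", "StateAndActions", "StandardLibrary", "TemporalLogic", "Definitions"].map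
      (fun f => let t := PySem.Dict.getD (PySem.Dict.mk r) f ""; if t = "" then "" else t))
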